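-- pv_equiv track=rewrite | github.com/nassro199/Codewars-solutions | python/kyu6/Duplicate Encoder.py | duplicate_encode
-- ===== SOURCE A (Python) =====
-- def duplicate_encode(word):
--     # Convert the word to lowercase
--     word = word.lower()
--     # Create a dictionary to store the count of each character in the word
--     char_count = {}
--     for char in word:
--         if char in char_count:
--             char_count[char] += 1
--         else:
--             char_count[char] = 1
--     # Use a list comprehension to create the encoded string
--     encoded_str = "".join(["(" if char_count[char] == 1 else ")" for char in word])
--     return encoded_str
-- ===== SOURCE B (Python) =====
-- def duplicate_encode(word):
--     # Sort the characters, collect those equal to their sorted neighbour (the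
--     # duplicated ones), then emit by membership in that set.
--     w = word.lower()
--     s = sorted(w)
--     dups = {a for a, b in zip(s, s[1:]) if a == b}
--     return "".join(")" if c in dups else "(" for c in w)
-- ===== Notes on version B (the rewrite author's own statement) =====
-- stated objective: alternative
-- what changed: Replaces per-character frequency counting with a sort-then-adjacent-scan: duplicated characters are exactly those equal to their neighbour in the sorted character list, collected once into a set and emitted by membership.
import Mathlib
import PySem

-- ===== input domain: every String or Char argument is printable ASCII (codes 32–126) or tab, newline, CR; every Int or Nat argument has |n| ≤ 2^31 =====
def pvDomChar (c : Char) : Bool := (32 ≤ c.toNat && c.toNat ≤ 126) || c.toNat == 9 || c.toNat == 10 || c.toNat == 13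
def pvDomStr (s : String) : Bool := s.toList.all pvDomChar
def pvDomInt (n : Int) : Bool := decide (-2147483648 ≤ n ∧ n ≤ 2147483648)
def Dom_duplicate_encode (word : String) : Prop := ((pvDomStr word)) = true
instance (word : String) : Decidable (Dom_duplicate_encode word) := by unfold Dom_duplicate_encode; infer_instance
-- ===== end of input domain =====

-- B replaces A's frequency dictionary with a sort-then-adjacent-scan: duplicated characters are those equal to their sorted neighbour (alternative algorithm, same output).


-- ===== PORT A =====
-- char_count[char] is ported as getD (the key is always present when read, so Python's [] never raises here)
def duplicate_encode (word : String) : String :=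
  let w := PySem.Str.lower word
  let char_count : PySem.Dict Char Int :=
    w.toList.foldl
      (fun d c => if d.contains c then d.modify c 0 (· + 1) else d.insert c 1)
      PySem.Dict.empty
  PySem.Str.join "" (w.toList.map (fun c => if char_count.getD c 0 == 1 then "(" else ")"))

-- ===== PORT B =====
def duplicate_encode_alt (word : String) : String :=
  let w := (PySem.Str.lower word).toList
  let s := PySem.List.sorted w (fun c => c)
  let dups : PySem.Set Char :=
    PySem.Set.ofList (((s.zip (PySem.List.slice s (some 1) none)).filter (fun p => p.1 == p.2)).map Prod.fst)
  PySem.Str.join "" (w.map (fun c => if PySem.Set.contains dups c then ")" else "("))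

-- ===== PRECONDITION & SPEC =====
def Spec_duplicate_encode (word : String) (out : String) : Prop := out = duplicate_encode_alt word
instance (word : String) (out : String) : Decidable (Spec_duplicate_encode word out) := by unfold Spec_duplicate_encode; infer_instance

-- ===== CLAIM =====
def Claim_equal_duplicate_encode : Prop := ∀ (word : String), Dom_duplicate_encode word → Spec_duplicate_encode word (duplicate_encode word)

-- ===== LEMMAS AND PROOFS =====

-- A's if-contains-then-modify-else-insert counting loop computes the character count.
theorem getD_count_loop (l : List Char) (d : PySem.Dict Char Int) (v : Char) :
    (l.foldl (fun d c => if d.contains c then d.modify c 0 (· + 1) else d.insert c 1) d).getD v 0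
      = d.getD v 0 + (l.count v : Int) := by
  induction l generalizing d with
  | nil => simp
  | cons c l ih =>
    simp only [List.foldl_cons, ih, List.count_cons]
    by_cases hc : d.contains c = true
    · simp only [hc, if_true, PySem.Dict.getD_modify]
      by_cases hv : v = c
      · subst hv; simp; omega
      · simp [hv, beq_iff_eq, Ne.symm hv]
    · simp only [Bool.not_eq_true] at hc
      simp only [hc, Bool.false_eq_true, if_false, PySem.Dict.getD_insert]
      by_cases hv : v = c
      · subst hv
        rw [PySem.Dict.getD_of_not_contains _ _ hc]
        simp; omega
      · simp [hv, beq_iff_eq, Ne.symm hv]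

-- c survives the filter-equal-pairs-then-fst extraction iff (c, c) is an adjacent pair.
theorem mem_fst_filter_iff (L : List (Char × Char)) (c : Char) :
    (c ∈ (L.filter (fun p => p.1 == p.2)).map Prod.fst) ↔ (c, c) ∈ L := by
  simp only [List.mem_map, List.mem_filter]
  constructor
  · rintro ⟨⟨x, y⟩, ⟨hm, he⟩, hf⟩
    simp only [beq_iff_eq] at he
    simp only at hf
    subst hf; subst he; exact hm
  · intro h
    exact ⟨(c, c), ⟨h, by simp⟩, rfl⟩

-- In a (≤)-sorted list, (c, c) is an adjacent pair iff c occurs at least twice.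
theorem adj_pair_iff_two_le_count (s : List Char) (hs : s.Pairwise (· ≤ ·)) (c : Char) :
    ((c, c) ∈ s.zip (s.drop 1)) ↔ 2 ≤ s.count c := by
  induction s with
  | nil => simp
  | cons a t ih =>
    cases t with
    | nil =>
      simp only [List.drop_succ_cons, List.drop_zero, List.zip_nil_right, List.not_mem_nil,
        false_iff, not_le, List.count_cons, List.count_nil]
      by_cases h : a = c <;> simp [h]
    | cons b u =>
      rw [List.pairwise_cons] at hs
      obtain ⟨hale, hrest⟩ := hs
      have ih' := ih hrest
      simp only [List.drop_succ_cons, List.drop_zero, List.zip_cons_cons, List.mem_cons] at ih' ⊢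
      constructor
      · rintro (heq | hmem)
        · obtain ⟨h1, h2⟩ := Prod.mk.injEq .. ▸ heq
          rw [← h1, ← h2]
          simp
        · have h2 : 2 ≤ (b :: u).count c := ih'.mp (by simpa using hmem)
          rw [List.count_cons]; omega
      · intro hcnt
        rw [List.count_cons] at hcnt
        by_cases hac : a = c
        · subst hac
          have hmem : a ∈ b :: u := by
            refine List.count_pos_iff.mp ?_
            by_contra h
            have h0 : (b :: u).count a = 0 := by omega
            rw [h0] at hcnt; simp at hcnt
          have hba : b ≤ a := by
            rcases List.mem_cons.mp hmem with h | h
            · exact h ▸ le_refl a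
            · exact (List.pairwise_cons.mp hrest).1 a h
          have hab : a = b := le_antisymm (hale b List.mem_cons_self) hba
          exact Or.inl (by rw [← hab])
        · have hcnt2 : 2 ≤ (b :: u).count c := by
            rw [if_neg (by simp [hac] : ¬ ((a == c) = true))] at hcnt
            omega
          exact Or.inr (by simpa using ih'.mpr hcnt2)

-- ===== VERDICT =====
theorem duplicate_encode_spec : Claim_equal_duplicate_encode := by
  intro word _
  show duplicate_encode word = duplicate_encode_alt word
  simp only [duplicate_encode, duplicate_encode_alt]
  refine congrArg (PySem.Str.join "") ?_
  apply List.map_congr_left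
  intro c hc
  rw [getD_count_loop, PySem.Dict.getD_empty, zero_add]
  set w := (PySem.Str.lower word).toList with hw
  set s := PySem.List.sorted w (fun c => c) with hsdef
  have hperm : s.Perm w := PySem.List.sorted_perm w (fun c => c) false
  have hpair : s.Pairwise (· ≤ ·) := by
    simpa using PySem.List.sorted_pairwise w (fun c => c)
  have hslice : PySem.List.slice s (some (1 : Int)) none = s.drop 1 := by
    rw [PySem.List.slice_from s (a := 1) (by norm_num)]; norm_num
  have hmemiff : (PySem.Set.contains
      (PySem.Set.ofList (((s.zip (PySem.List.slice s (some 1) none)).filter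
        (fun p => p.1 == p.2)).map Prod.fst)) c = true) ↔ 2 ≤ w.count c := by
    rw [PySem.Set.contains_iff, PySem.Set.mem_ofList, hslice, mem_fst_filter_iff,
      adj_pair_iff_two_le_count s hpair c, hperm.count_eq]
  have hc1 : 1 ≤ w.count c := List.count_pos_iff.mpr hc
  by_cases h2 : 2 ≤ w.count c
  · rw [hmemiff.mpr h2]
    have hne : ¬ (((w.count c : Int)) == 1) = true := by simp; omega
    simp [Bool.eq_false_iff.mpr hne]
  · have h1 : w.count c = 1 := by omega
    have hfalse : PySem.Set.contains
        (PySem.Set.ofList (((s.zip (PySem.List.slice s (some 1) none)).filter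
          (fun p => p.1 == p.2)).map Prod.fst)) c = false := by
      rw [Bool.eq_false_iff]; intro h; exact h2 (hmemiff.mp h)
    rw [hfalse]
    simp [h1]
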